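-- pv_equiv track=rewrite | github.com/MrBrantCode/unitest_baseline | mut_generate/mist_train_taco/taco_10603/solution.py | shorten_spell
-- ===== SOURCE A (Python) =====
-- def shorten_spell(spell_text: str) -> str:
--     # Split the input text into lines
--     lines = spell_text.splitlines()
--
--     # Initialize lists to store processed lines and their amplifying status
--     processed_lines = []
--     is_amplifying = []
--
--     # Process each line to determine if it's amplifying or not
--     for line in lines:
--         stripped_line = line.lstrip()
--         if stripped_line.startswith('#'):
--             processed_lines.append(line)
--             is_amplifying.append(True)
--         else:
--             processed_lines.append(line.replace(' ', ''))
--             is_amplifying.append(False)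
--
--     # Initialize the result string
--     result = []
--
--     # Concatenate non-amplifying lines and add newlines for amplifying lines
--     i = 0
--     while i < len(processed_lines):
--         if not is_amplifying[i]:
--             # Concatenate non-amplifying lines
--             concatenated_line = processed_lines[i]
--             while i + 1 < len(processed_lines) and not is_amplifying[i + 1]:
--                 concatenated_line += processed_lines[i + 1]
--                 i += 1
--             result.append(concatenated_line)
--         else:
--             # Add amplifying lines as they are
--             result.append(processed_lines[i])
--         i += 1
--
--     # Join the result list into a single string with newline characters
--     shortened_spell = '\n'.join(result)
--
--     return shortened_spell
-- ===== SOURCE B (Python) =====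
-- def shorten_spell(spell_text: str) -> str:
--     # One pass: buffer the current run of non-comment lines, flush on comments.
--     result = []
--     buf = None
--     for line in spell_text.splitlines():
--         if line.lstrip().startswith('#'):
--             if buf is not None:
--                 result.append(buf)
--                 buf = None
--             result.append(line)
--         else:
--             comp = line.replace(' ', '')
--             buf = comp if buf is None else buf + comp
--     if buf is not None:
--         result.append(buf)
--     return '\n'.join(result)
-- ===== Notes on version B (the rewrite author's own statement) =====
-- stated objective: simpler
-- what changed: Replaced A's two-pass design (build processed-lines and flag lists, then an index-based while loop with a nested inner while to concatenate runs) by a single pass over the lines maintaining one buffer for the current run of non-comment lines, flushed when a comment line appears.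
import Mathlib
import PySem

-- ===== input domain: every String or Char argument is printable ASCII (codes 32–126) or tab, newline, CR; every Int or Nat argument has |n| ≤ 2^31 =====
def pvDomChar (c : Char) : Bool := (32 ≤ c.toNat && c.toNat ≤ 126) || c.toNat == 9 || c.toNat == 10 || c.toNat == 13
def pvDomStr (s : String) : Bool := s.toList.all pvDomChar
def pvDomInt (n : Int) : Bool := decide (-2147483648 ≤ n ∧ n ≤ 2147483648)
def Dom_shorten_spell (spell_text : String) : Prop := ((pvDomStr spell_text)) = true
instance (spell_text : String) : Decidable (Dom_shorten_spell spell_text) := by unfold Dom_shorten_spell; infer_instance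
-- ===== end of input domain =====

-- B is a simpler single-pass re-decomposition of the same task; equivalence is proved for all inputs.

-- ===== PORT A =====
-- inner while loop of A: absorb following non-comment processed lines into the run
def shortenAInner (s : String) : List (String × Bool) → String × List (String × Bool)
  | (t, false) :: r => shortenAInner (s ++ t) r
  | ps => (s, ps)

-- termination measure for the outer while loop (the inner loop only consumes)
theorem shortenAInner_len (s : String) (ps : List (String × Bool)) :
    (shortenAInner s ps).2.length ≤ ps.length := by
  induction ps generalizing s with
  | nil => simp [shortenAInner]
  | cons p r ih =>
    match p with
    | (t, false) => simpa [shortenAInner] using le_trans (ih (s ++ t)) (Nat.le_succ _)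
    | (t, true) => simp [shortenAInner]

-- outer while loop of A over the zipped (processed_lines, is_amplifying)
def shortenALoop : List (String × Bool) → List String
  | [] => []
  | (s, true) :: rest => s :: shortenALoop rest
  | (s, false) :: rest =>
    let r := shortenAInner s rest
    r.1 :: shortenALoop r.2
termination_by ps => ps.length
decreasing_by
  · simp only [List.length_cons]; omega
  · have h := shortenAInner_len s rest
    simp only [List.length_cons]; omega

def shorten_spell (spell_text : String) : String :=
  let lines := PySem.Str.splitlines spell_text
  let pf := lines.foldl (fun (acc : List String × List Bool) line =>
      if PySem.Str.startswith (PySem.Str.lstrip line) "#" then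
        (acc.1 ++ [line], acc.2 ++ [true])
      else
        (acc.1 ++ [PySem.Str.replace line " " ""], acc.2 ++ [false])) ([], [])
  PySem.Str.join "\n" (shortenALoop (pf.1.zip pf.2))

-- ===== PORT B =====
def shorten_spell_alt (spell_text : String) : String :=
  let final := (PySem.Str.splitlines spell_text).foldl
    (fun (acc : List String × Option String) line =>
      if PySem.Str.startswith (PySem.Str.lstrip line) "#" then
        (acc.1 ++ (match acc.2 with | some b => [b] | none => []) ++ [line], none)
      else
        (acc.1, some (match acc.2 with
          | some b => b ++ PySem.Str.replace line " " ""
          | none => PySem.Str.replace line " " ""))) ([], none)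
  PySem.Str.join "\n" (final.1 ++ (match final.2 with | some b => [b] | none => []))

-- ===== PRECONDITION & SPEC =====
def Spec_shorten_spell (spell_text : String) (out : String) : Prop := out = shorten_spell_alt spell_text
instance (spell_text : String) (out : String) : Decidable (Spec_shorten_spell spell_text out) := by unfold Spec_shorten_spell; infer_instance

-- ===== CLAIM (what is proved, stated in full; the proofs are below) =====
def Claim_equal_shorten_spell : Prop := ∀ (spell_text : String), Dom_shorten_spell spell_text → Spec_shorten_spell spell_text (shorten_spell spell_text)

-- ===== LEMMAS AND PROOFS =====

def pvFlag (l : String) : Bool := PySem.Str.startswith (PySem.Str.lstrip l) "#"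
def pvProc (l : String) : String := if pvFlag l then l else PySem.Str.replace l " " ""

theorem foldlA_eq (lines : List String) (p : List String) (f : List Bool) :
    lines.foldl (fun (acc : List String × List Bool) line =>
      if PySem.Str.startswith (PySem.Str.lstrip line) "#" then
        (acc.1 ++ [line], acc.2 ++ [true])
      else
        (acc.1 ++ [PySem.Str.replace line " " ""], acc.2 ++ [false])) (p, f)
    = (p ++ lines.map pvProc, f ++ lines.map pvFlag) := by
  induction lines generalizing p f with
  | nil => simp
  | cons l ls ih =>
    rw [List.foldl_cons]
    by_cases h : PySem.Str.startswith (PySem.Str.lstrip l) "#" = true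
    · have hp : pvProc l = l := by rw [pvProc, pvFlag, if_pos h]
      have hf : pvFlag l = true := h
      rw [if_pos h, ih, List.map_cons, List.map_cons, hp, hf]
      simp
    · have hp : pvProc l = PySem.Str.replace l " " "" := by rw [pvProc, pvFlag, if_neg h]
      have hf : pvFlag l = false := by rw [pvFlag]; exact Bool.not_eq_true _ |>.mp h
      rw [if_neg h, ih, List.map_cons, List.map_cons, hp, hf]
      simp

-- A's run loop with a pending buffer, as consumed from the front
def shortenALoopBuf : Option String → List (String × Bool) → List String
  | none, ps => shortenALoop ps
  | some b, ps =>
    let r := shortenAInner b ps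
    r.1 :: shortenALoop r.2

theorem bFold_eq (lines : List String) (res : List String) (buf : Option String) :
    (let final := lines.foldl
      (fun (acc : List String × Option String) line =>
        if PySem.Str.startswith (PySem.Str.lstrip line) "#" then
          (acc.1 ++ (match acc.2 with | some b => [b] | none => []) ++ [line], none)
        else
          (acc.1, some (match acc.2 with
            | some b => b ++ PySem.Str.replace line " " ""
            | none => PySem.Str.replace line " " ""))) (res, buf)
     final.1 ++ (match final.2 with | some b => [b] | none => []))
    = res ++ shortenALoopBuf buf (lines.map (fun l => (pvProc l, pvFlag l))) := by
  induction lines generalizing res buf with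
  | nil =>
    cases buf <;> simp [shortenALoopBuf, shortenALoop, shortenAInner]
  | cons l ls ih =>
    rw [List.foldl_cons, List.map_cons]
    by_cases h : PySem.Str.startswith (PySem.Str.lstrip l) "#" = true
    · have hp : pvProc l = l := by rw [pvProc, pvFlag, if_pos h]
      have hf : pvFlag l = true := h
      rw [if_pos h, ih, hp, hf]
      cases buf with
      | none => simp [shortenALoopBuf, shortenALoop]
      | some b => simp [shortenALoopBuf, shortenALoop, shortenAInner]
    · have hp : pvProc l = PySem.Str.replace l " " "" := by rw [pvProc, pvFlag, if_neg h]
      have hf : pvFlag l = false := by rw [pvFlag]; exact Bool.not_eq_true _ |>.mp h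
      rw [if_neg h, ih, hp, hf]
      cases buf with
      | none => simp [shortenALoopBuf, shortenALoop]
      | some b => simp [shortenALoopBuf, shortenAInner]

-- ===== VERDICT (by name: the statement is the Claim_ definition above) =====
theorem shorten_spell_spec : Claim_equal_shorten_spell := by
  intro spell_text _
  unfold Spec_shorten_spell shorten_spell shorten_spell_alt
  dsimp only
  rw [foldlA_eq]
  have hz : ((PySem.Str.splitlines spell_text).map pvProc).zip
      ((PySem.Str.splitlines spell_text).map pvFlag)
      = (PySem.Str.splitlines spell_text).map (fun l => (pvProc l, pvFlag l)) := by
    rw [List.zip_map']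
  have hb := bFold_eq (PySem.Str.splitlines spell_text) [] none
  dsimp only at hb
  simp only [List.nil_append] at hz hb ⊢
  rw [hz, hb]
  rfl
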